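-- pv_equiv track=rewrite | github.com/ChouGiGiNYCU/LDPC | python_LDPC/LDPC_10_5/function.py | Construct_LLM
-- ===== SOURCE A (Python) =====
-- from collections import defaultdict
--
-- def Construct_LLM(CN2VN_pos,hidden_layer_node,parity_check_matrix_colsize):
--     # construct fourth mask of  CN ->VN + channel LLR = output
--     dict_cn_to_output = defaultdict(list)
--     idx=0
--     for CN in range(0,len(CN2VN_pos)):
--         for VN in CN2VN_pos[CN]:
--             dict_cn_to_output[VN].append(idx)
--             idx+=1
--     # sort
--     sorted_keys = sorted(dict_cn_to_output.keys(),key=lambda x:x)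
--     dict_cn_to_output_sort = {key: dict_cn_to_output[key] for key in sorted_keys}
--     dict_cn_to_output=dict_cn_to_output_sort.copy()
--
--     # construct fouth final CN update to result
--     CN2VN_mask_output = [[False]*hidden_layer_node for i in range(0,parity_check_matrix_colsize)]
--     for VN in dict_cn_to_output.keys():
--         for node in dict_cn_to_output[VN]:
--             CN2VN_mask_output[VN][node] = True
--     return CN2VN_mask_output
-- ===== SOURCE B (Python) =====
-- def Construct_LLM(CN2VN_pos, hidden_layer_node, parity_check_matrix_colsize):
--     # One direct pass: allocate the mask and set each edge's cell immediately,
--     # keeping a running edge index; no dict, no sort, no second fill pass.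
--     mask = [[False] * hidden_layer_node for _ in range(parity_check_matrix_colsize)]
--     idx = 0
--     for row in CN2VN_pos:
--         for VN in row:
--             mask[VN][idx] = True
--             idx += 1
--     return mask
-- ===== Notes on version B (the rewrite author's own statement) =====
-- stated objective: simpler
-- what changed: Replaces A's three phases (group edge indices per VN into a defaultdict, sort the keys and rebuild the dict, then a second nested fill pass) by a single direct nested pass over CN2VN_pos that sets mask[VN][idx] immediately with a running edge index; no dict and no sort.
import Mathlib
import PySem

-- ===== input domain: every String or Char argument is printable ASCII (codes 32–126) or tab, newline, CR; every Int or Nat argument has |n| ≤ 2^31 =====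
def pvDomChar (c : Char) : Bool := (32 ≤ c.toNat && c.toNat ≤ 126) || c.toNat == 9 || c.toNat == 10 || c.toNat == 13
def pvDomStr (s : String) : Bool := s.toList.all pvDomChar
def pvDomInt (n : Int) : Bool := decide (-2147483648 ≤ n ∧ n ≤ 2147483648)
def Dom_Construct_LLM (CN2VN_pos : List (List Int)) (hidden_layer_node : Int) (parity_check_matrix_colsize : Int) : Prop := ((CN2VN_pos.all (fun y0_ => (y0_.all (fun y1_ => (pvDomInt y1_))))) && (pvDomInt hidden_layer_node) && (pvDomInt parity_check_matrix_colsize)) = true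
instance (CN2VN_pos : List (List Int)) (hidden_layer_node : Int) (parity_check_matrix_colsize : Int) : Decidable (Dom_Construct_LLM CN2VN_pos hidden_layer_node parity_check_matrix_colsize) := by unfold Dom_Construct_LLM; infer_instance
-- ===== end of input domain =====

-- B replaces A's three phases (group edge indices per VN into a dict, sort keys and rebuild
-- the dict, then a second fill pass) by one direct nested pass setting mask[VN][idx]; objective: simpler.


-- Both Pythons execute the same statement 'matrix[VN][node] = True' (Python index semantics,
-- negative index from the end); this helper is that statement. Out-of-range (Python IndexError)
-- leaves the matrix unchanged — such inputs are excluded by Pre_Construct_LLM.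
def pySetTrue (m : List (List Bool)) (i j : Int) : List (List Bool) :=
  PySem.List.pySetD m i (PySem.List.pySetD (PySem.List.pyGetD m i []) j true)

-- ===== PORT A =====
def Construct_LLM (CN2VN_pos : List (List Int)) (hidden_layer_node : Int) (parity_check_matrix_colsize : Int) : List (List Bool) :=
  -- phase 1: dict_cn_to_output[VN].append(idx) over all edges (defaultdict(list))
  let st := (PySem.List.pyRange 0 (CN2VN_pos.length : Int) 1).foldl
    (fun (s : PySem.Dict Int (List Int) × Int) CN =>
      (PySem.List.pyGetD CN2VN_pos CN []).foldl
        (fun (s : PySem.Dict Int (List Int) × Int) VN =>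
          (s.1.modify VN [] (fun l => l ++ [s.2]), s.2 + 1)) s)
    (PySem.Dict.empty, 0)
  let d := st.1
  -- phase 2: sort the keys and rebuild the dict in sorted key order
  let sortedKeys := PySem.List.sorted (PySem.Dict.keys d) (fun x => x) false
  let dSort := sortedKeys.foldl
    (fun (d2 : PySem.Dict Int (List Int)) key => d2.insert key (d.getD key [])) PySem.Dict.empty
  -- phase 3: allocate the mask and fill it from the sorted dict
  let mask0 := (PySem.List.pyRange 0 parity_check_matrix_colsize 1).map
    (fun _ => PySem.List.pyRepeat [false] hidden_layer_node)
  (PySem.Dict.keys dSort).foldl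
    (fun m VN => (dSort.getD VN []).foldl (fun m node => pySetTrue m VN node) m) mask0

-- ===== PORT B =====
def Construct_LLM_alt (CN2VN_pos : List (List Int)) (hidden_layer_node : Int) (parity_check_matrix_colsize : Int) : List (List Bool) :=
  let mask0 := (PySem.List.pyRange 0 parity_check_matrix_colsize 1).map
    (fun _ => PySem.List.pyRepeat [false] hidden_layer_node)
  (CN2VN_pos.foldl
    (fun (s : List (List Bool) × Int) row =>
      row.foldl (fun (s : List (List Bool) × Int) VN => (pySetTrue s.1 VN s.2, s.2 + 1)) s)
    (mask0, 0)).1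

-- ===== PRECONDITION & SPEC =====
-- Pre_ excludes exactly the inputs on which the Python A raises IndexError: an edge endpoint
-- outside [-colsize, colsize) or more edges than hidden_layer_node columns (B raises there too).
def Pre_Construct_LLM (CN2VN_pos : List (List Int)) (hidden_layer_node : Int) (parity_check_matrix_colsize : Int) : Prop :=
  (∀ v ∈ CN2VN_pos.flatten, -parity_check_matrix_colsize ≤ v ∧ v < parity_check_matrix_colsize) ∧
  (CN2VN_pos.flatten = [] ∨ (CN2VN_pos.flatten.length : Int) ≤ hidden_layer_node)
instance (CN2VN_pos : List (List Int)) (hidden_layer_node : Int) (parity_check_matrix_colsize : Int) : Decidable (Pre_Construct_LLM CN2VN_pos hidden_layer_node parity_check_matrix_colsize) := by unfold Pre_Construct_LLM; infer_instance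

def pvWitness_Construct_LLM : List (List Int) × Int × Int := ([[0], [1, 0]], 3, 2)

def Spec_Construct_LLM (CN2VN_pos : List (List Int)) (hidden_layer_node : Int) (parity_check_matrix_colsize : Int) (out : List (List Bool)) : Prop := out = Construct_LLM_alt CN2VN_pos hidden_layer_node parity_check_matrix_colsize
instance (CN2VN_pos : List (List Int)) (hidden_layer_node : Int) (parity_check_matrix_colsize : Int) (out : List (List Bool)) : Decidable (Spec_Construct_LLM CN2VN_pos hidden_layer_node parity_check_matrix_colsize out) := by unfold Spec_Construct_LLM; infer_instance

-- ===== CLAIM (what is proved, stated in full; the proofs are below) =====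
def Claim_equal_Construct_LLM : Prop := ∀ (CN2VN_pos : List (List Int)) (hidden_layer_node : Int) (parity_check_matrix_colsize : Int), Dom_Construct_LLM CN2VN_pos hidden_layer_node parity_check_matrix_colsize → Pre_Construct_LLM CN2VN_pos hidden_layer_node parity_check_matrix_colsize → Spec_Construct_LLM CN2VN_pos hidden_layer_node parity_check_matrix_colsize (Construct_LLM CN2VN_pos hidden_layer_node parity_check_matrix_colsize)

-- ===== LEMMAS AND PROOFS =====

-- the list of (row index, column index) writes an edge list es starting at edge index i performs
def writesOf : List Int → Int → List (Int × Int)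
  | [], _ => []
  | v :: t, i => (v, i) :: writesOf t (i + 1)

-- applying a list of writes to a matrix
def applyW (m : List (List Bool)) (ps : List (Int × Int)) : List (List Bool) :=
  ps.foldl (fun m p => pySetTrue m p.1 p.2) m

def cell (m : List (List Bool)) (r c : Nat) : Bool := (m.getD r []).getD c false

theorem pyIdx?_lt {n : Nat} {i : Int} {k : Nat} (h : PySem.List.pyIdx? n i = some k) : k < n := by
  simp only [PySem.List.pyIdx?] at h
  split_ifs at h with h1 h2 h3 <;> simp_all <;> omega

theorem pySetD_of_idx {α : Type} (xs : List α) (i : Int) (v : α) (k : Nat)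
    (h : PySem.List.pyIdx? xs.length i = some k) : PySem.List.pySetD xs i v = xs.set k v := by
  simp [PySem.List.pySetD, PySem.List.pySet?, h]

theorem pySetD_of_none {α : Type} (xs : List α) (i : Int) (v : α)
    (h : PySem.List.pyIdx? xs.length i = none) : PySem.List.pySetD xs i v = xs := by
  simp [PySem.List.pySetD, PySem.List.pySet?, h]

theorem pyGetD_of_idx {α : Type} (xs : List α) (i : Int) (d : α) (k : Nat)
    (h : PySem.List.pyIdx? xs.length i = some k) :
    PySem.List.pyGetD xs i d = xs[k]'(pyIdx?_lt h) := by
  simp [PySem.List.pyGetD, PySem.List.pyGet?, h, List.getElem?_eq_getElem (pyIdx?_lt h)]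

theorem length_pySetTrue (m : List (List Bool)) (i j : Int) : (pySetTrue m i j).length = m.length := by
  simp [pySetTrue, PySem.List.length_pySetD]

theorem rows_pySetTrue {C : Nat} {m : List (List Bool)} (hrows : ∀ row ∈ m, row.length = C)
    (i j : Int) : ∀ row ∈ pySetTrue m i j, row.length = C := by
  intro row hr
  unfold pySetTrue at hr
  rcases h : PySem.List.pyIdx? m.length i with _ | k
  · rw [pySetD_of_none _ _ _ h] at hr; exact hrows row hr
  · rw [pySetD_of_idx _ _ _ _ h] at hr
    rcases List.mem_or_eq_of_mem_set hr with h2 | h2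
    · exact hrows row h2
    · subst h2
      rw [pyGetD_of_idx _ _ _ _ h, PySem.List.length_pySetD]
      exact hrows _ (List.getElem_mem _)

theorem cell_pySetTrue {C : Nat} {m : List (List Bool)} (hrows : ∀ row ∈ m, row.length = C)
    (i j : Int) (r c : Nat) :
    cell (pySetTrue m i j) r c =
      (cell m r c || ((PySem.List.pyIdx? m.length i == some r) && (PySem.List.pyIdx? C j == some c))) := by
  unfold pySetTrue cell
  rcases h : PySem.List.pyIdx? m.length i with _ | k
  · rw [pySetD_of_none _ _ _ h]; simp
  · rw [pySetD_of_idx _ _ _ _ h, pyGetD_of_idx _ _ _ _ h]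
    have hk : k < m.length := pyIdx?_lt h
    have hCk : (m[k]'hk).length = C := hrows _ (List.getElem_mem _)
    by_cases hr : r = k
    · subst hr
      have hset : (m.set r (PySem.List.pySetD (m[r]'hk) j true)).getD r [] = PySem.List.pySetD (m[r]'hk) j true := by
        rw [List.getD_eq_getElem?_getD, List.getElem?_set_self hk]
        rfl
      have hmr : m.getD r [] = m[r]'hk := by
        rw [List.getD_eq_getElem?_getD, List.getElem?_eq_getElem hk]
        rfl
      rw [hset, hmr]
      rcases h2 : PySem.List.pyIdx? C j with _ | c'
      · rw [pySetD_of_none _ _ _ (by rw [hCk]; exact h2)]; simp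
      · rw [pySetD_of_idx _ _ _ _ (by rw [hCk]; exact h2)]
        have hc' : c' < C := pyIdx?_lt h2
        by_cases hc : c = c'
        · subst hc
          rw [List.getD_eq_getElem?_getD, List.getElem?_set_self (by rw [hCk]; exact hc')]
          simp
        · rw [List.getD_eq_getElem?_getD, List.getElem?_set_ne (by omega), ← List.getD_eq_getElem?_getD]
          simp [(Ne.symm hc : c' ≠ c)]
    · have hset : (m.set k (PySem.List.pySetD (m[k]'hk) j true)).getD r [] = m.getD r [] := by
        rw [List.getD_eq_getElem?_getD, List.getElem?_set_ne (by omega), ← List.getD_eq_getElem?_getD]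
      rw [hset]
      simp [(Ne.symm hr : k ≠ r)]

theorem length_applyW (ps : List (Int × Int)) : ∀ m : List (List Bool), (applyW m ps).length = m.length := by
  induction ps with
  | nil => intro m; rfl
  | cons p t ih => intro m; rw [applyW, List.foldl_cons, ← applyW, ih, length_pySetTrue]

theorem rows_applyW {C : Nat} (ps : List (Int × Int)) :
    ∀ m : List (List Bool), (∀ row ∈ m, row.length = C) → ∀ row ∈ applyW m ps, row.length = C := by
  induction ps with
  | nil => intro m h; exact h
  | cons p t ih =>
      intro m h
      rw [applyW, List.foldl_cons, ← applyW]
      exact ih _ (rows_pySetTrue h p.1 p.2)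

theorem cell_applyW {C : Nat} (ps : List (Int × Int)) :
    ∀ m : List (List Bool), (∀ row ∈ m, row.length = C) → ∀ r c : Nat,
    cell (applyW m ps) r c =
      (cell m r c || ps.any (fun p => (PySem.List.pyIdx? m.length p.1 == some r) && (PySem.List.pyIdx? C p.2 == some c))) := by
  induction ps with
  | nil => intro m h r c; simp [applyW]
  | cons p t ih =>
      intro m h r c
      rw [applyW, List.foldl_cons, ← applyW]
      rw [ih _ (rows_pySetTrue h p.1 p.2) r c, cell_pySetTrue h p.1 p.2 r c, length_pySetTrue]
      simp [Bool.or_assoc]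

theorem applyW_append (m : List (List Bool)) (a b : List (Int × Int)) :
    applyW m (a ++ b) = applyW (applyW m a) b := by
  simp [applyW, List.foldl_append]

theorem applyW_eq_of_mem_iff {C : Nat} (m : List (List Bool)) (hrows : ∀ row ∈ m, row.length = C)
    (ps₁ ps₂ : List (Int × Int)) (h : ∀ p, p ∈ ps₁ ↔ p ∈ ps₂) :
    applyW m ps₁ = applyW m ps₂ := by
  have hany : ∀ f : Int × Int → Bool, ps₁.any f = ps₂.any f := by
    intro f
    rcases h1 : ps₁.any f with _ | _ <;> rcases h2 : ps₂.any f with _ | _ <;> try rfl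
    · simp only [List.any_eq_true] at h2
      rcases h2 with ⟨p, hp, hf⟩
      have := (List.any_eq_true.2 ⟨p, (h p).2 hp, hf⟩); rw [h1] at this; exact absurd this (by simp)
    · simp only [List.any_eq_true] at h1
      rcases h1 with ⟨p, hp, hf⟩
      have := (List.any_eq_true.2 ⟨p, (h p).1 hp, hf⟩); rw [h2] at this; exact absurd this (by simp)
  apply List.ext_getElem
  · rw [length_applyW, length_applyW]
  · intro r h1 h2
    have hl1 : (applyW m ps₁)[r] ∈ applyW m ps₁ := List.getElem_mem _
    have hl2 : (applyW m ps₂)[r] ∈ applyW m ps₂ := List.getElem_mem _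
    apply List.ext_getElem
    · rw [rows_applyW ps₁ m hrows _ hl1, rows_applyW ps₂ m hrows _ hl2]
    · intro c hc1 hc2
      have e1 : cell (applyW m ps₁) r c = (applyW m ps₁)[r][c] := by
        rw [cell, List.getD_eq_getElem?_getD (l := applyW m ps₁) (i := r) (a := []),
          List.getElem?_eq_getElem h1, Option.getD_some, List.getD_eq_getElem?_getD,
          List.getElem?_eq_getElem hc1, Option.getD_some]
      have e2 : cell (applyW m ps₂) r c = (applyW m ps₂)[r][c] := by
        rw [cell, List.getD_eq_getElem?_getD (l := applyW m ps₂) (i := r) (a := []),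
          List.getElem?_eq_getElem h2, Option.getD_some, List.getD_eq_getElem?_getD,
          List.getElem?_eq_getElem hc2, Option.getD_some]
      rw [← e1, ← e2, cell_applyW ps₁ m hrows r c, cell_applyW ps₂ m hrows r c, hany]

theorem writesOf_append (a b : List Int) (i : Int) :
    writesOf (a ++ b) i = writesOf a i ++ writesOf b (i + a.length) := by
  induction a generalizing i with
  | nil => simp [writesOf]
  | cons v t ih => simp [writesOf, ih]; ring_nf

theorem B_inner (row : List Int) : ∀ (m : List (List Bool)) (i : Int),
    row.foldl (fun (s : List (List Bool) × Int) VN => (pySetTrue s.1 VN s.2, s.2 + 1)) (m, i)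
      = (applyW m (writesOf row i), i + row.length) := by
  induction row with
  | nil => intro m i; simp [writesOf, applyW]
  | cons v t ih =>
      intro m i
      simp only [List.foldl_cons, ih, writesOf, applyW, List.length_cons, Prod.mk.injEq]
      exact ⟨trivial, by push_cast; ring⟩

theorem B_loop (rows : List (List Int)) : ∀ (m : List (List Bool)) (i : Int),
    rows.foldl (fun (s : List (List Bool) × Int) row =>
        row.foldl (fun (s : List (List Bool) × Int) VN => (pySetTrue s.1 VN s.2, s.2 + 1)) s) (m, i)
      = (applyW m (writesOf rows.flatten i), i + rows.flatten.length) := by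
  induction rows with
  | nil => intro m i; simp [writesOf, applyW]
  | cons row rs ih =>
      intro m i
      simp only [List.foldl_cons, B_inner, ih, List.flatten_cons, writesOf_append]
      unfold applyW
      rw [List.foldl_append]
      simp only [Prod.mk.injEq, List.length_append]
      exact ⟨trivial, by push_cast; ring⟩

theorem A_dict_inner (row : List Int) : ∀ (d : PySem.Dict Int (List Int)) (i : Int),
    row.foldl (fun (s : PySem.Dict Int (List Int) × Int) VN =>
        (s.1.modify VN [] (fun l => l ++ [s.2]), s.2 + 1)) (d, i)
      = ((writesOf row i).foldl (fun d p => d.modify p.1 [] (fun l => l ++ [p.2])) d, i + row.length) := by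
  induction row with
  | nil => intro d i; simp [writesOf]
  | cons v t ih =>
      intro d i
      simp only [List.foldl_cons, ih, writesOf, List.length_cons, Prod.mk.injEq]
      exact ⟨trivial, by push_cast; ring⟩

theorem A_dict_loop (rows : List (List Int)) : ∀ (d : PySem.Dict Int (List Int)) (i : Int),
    rows.foldl (fun (s : PySem.Dict Int (List Int) × Int) row =>
        row.foldl (fun (s : PySem.Dict Int (List Int) × Int) VN =>
          (s.1.modify VN [] (fun l => l ++ [s.2]), s.2 + 1)) s) (d, i)
      = ((writesOf rows.flatten i).foldl (fun d p => d.modify p.1 [] (fun l => l ++ [p.2])) d, i + rows.flatten.length) := by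
  induction rows with
  | nil => intro d i; simp [writesOf]
  | cons row rs ih =>
      intro d i
      simp only [List.foldl_cons, A_dict_inner, ih, List.flatten_cons, writesOf_append]
      rw [List.foldl_append]
      simp only [Prod.mk.injEq, List.length_append]
      exact ⟨trivial, by push_cast; ring⟩

theorem rebuild_getD (ks : List Int) (g : Int → List Int) (v : Int) :
    ∀ d0 : PySem.Dict Int (List Int),
    ((ks.foldl (fun (d2 : PySem.Dict Int (List Int)) key => d2.insert key (g key)) d0).getD v [])
      = if v ∈ ks then g v else d0.getD v [] := by
  induction ks with
  | nil => intro d0; simp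
  | cons k t ih =>
      intro d0
      simp only [List.foldl_cons, ih, List.mem_cons]
      by_cases hvt : v ∈ t
      · simp [hvt]
      · by_cases hvk : v = k
        · simp [hvk]
        · simp [hvt, hvk, PySem.Dict.getD_insert]

theorem A_fill_inner (l : List Int) (v : Int) : ∀ m : List (List Bool),
    l.foldl (fun m node => pySetTrue m v node) m = applyW m (l.map (fun n => (v, n))) := by
  induction l with
  | nil => intro m; simp [applyW]
  | cons n t ih => intro m; simp only [List.foldl_cons, ih, List.map_cons, applyW, List.foldl_cons]

theorem A_fill (ks : List Int) (g : Int → List Int) : ∀ m : List (List Bool),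
    ks.foldl (fun m VN => (g VN).foldl (fun m node => pySetTrue m VN node) m) m
      = applyW m (ks.flatMap (fun VN => (g VN).map (fun n => (VN, n)))) := by
  induction ks with
  | nil => intro m; simp [applyW]
  | cons k t ih =>
      intro m
      rw [List.foldl_cons, A_fill_inner, List.flatMap_cons, applyW_append, ih]

-- ===== VERDICT (by name: the statement is the Claim_ definition above) =====
theorem Construct_LLM_spec : Claim_equal_Construct_LLM := by
  intro pos h c _ _
  unfold Spec_Construct_LLM Construct_LLM Construct_LLM_alt
  simp only []
  rw [B_loop]
  rw [PySem.List.foldl_pyRange_zero_pyGetD' pos []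
    (fun (s : PySem.Dict Int (List Int) × Int) row =>
      row.foldl (fun (s : PySem.Dict Int (List Int) × Int) VN =>
        (s.1.modify VN [] (fun l => l ++ [s.2]), s.2 + 1)) s) (PySem.Dict.empty, 0)]
  rw [A_dict_loop]
  dsimp only
  rw [A_fill]
  set W := writesOf pos.flatten 0 with hW
  set d : PySem.Dict Int (List Int) := W.foldl (fun d p => d.modify p.1 [] (fun l => l ++ [p.2])) PySem.Dict.empty with hd
  set sortedKeys := PySem.List.sorted (PySem.Dict.keys d) (fun x => x) false with hsk
  set dSort : PySem.Dict Int (List Int) := sortedKeys.foldl (fun (d2 : PySem.Dict Int (List Int)) key => d2.insert key (d.getD key [])) PySem.Dict.empty with hds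
  set mask0 := (PySem.List.pyRange 0 c 1).map (fun _ => PySem.List.pyRepeat [false] h) with hm0
  -- facts about the phase-1 dict
  have hgetD : ∀ v : Int, d.getD v [] = (W.filter (fun p => p.1 == v)).map (fun p => p.2) := by
    intro v
    rw [hd, PySem.Dict.getD_foldl_modify_append]
    simp
  have hkeys_of_getD : ∀ v : Int, d.getD v [] ≠ [] → v ∈ d.keys := by
    intro v hne
    by_contra hmem
    have hc : d.contains v = false := by
      rcases hcv : d.contains v with _ | _
      · rfl
      · exact absurd ((PySem.Dict.contains_iff_mem_keys d v).1 hcv) hmem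
    exact hne (PySem.Dict.getD_of_not_contains d [] hc)
  -- the rebuilt (sorted) dict agrees with d on every lookup
  have hdsort : ∀ v : Int, dSort.getD v [] = d.getD v [] := by
    intro v
    rw [hds, rebuild_getD]
    split_ifs with hv
    · rfl
    · have hvd : v ∉ d.keys := fun hk => hv (((PySem.List.sorted_perm d.keys (fun x => x) false).mem_iff).2 hk)
      have hc : d.contains v = false := by
        rcases hcv : d.contains v with _ | _
        · rfl
        · exact absurd ((PySem.Dict.contains_iff_mem_keys d v).1 hcv) hvd
      rw [PySem.Dict.getD_empty, (PySem.Dict.getD_of_not_contains d [] hc)]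
  -- membership in dSort's keys
  have hdskeys : ∀ v : Int, v ∈ PySem.Dict.keys dSort ↔ v ∈ sortedKeys := by
    intro v
    rw [hds, PySem.Dict.keys_foldl_insert, PySem.Dict.keys_empty]
    exact PySem.Set.mem_ofList sortedKeys v
  -- the write lists of the two ports contain the same pairs
  apply applyW_eq_of_mem_iff (C := h.toNat)
  · intro row hrow
    rw [hm0] at hrow
    rcases List.mem_map.1 hrow with ⟨_, _, rfl⟩
    rw [PySem.List.pyRepeat_singleton, List.length_replicate]
  · intro p
    constructor
    · intro hp
      rcases List.mem_flatMap.1 hp with ⟨v, _, hpv⟩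
      rcases List.mem_map.1 hpv with ⟨n, hn, rfl⟩
      rw [hdsort, hgetD] at hn
      rcases List.mem_map.1 hn with ⟨q, hq, rfl⟩
      have := List.mem_filter.1 hq
      have hq1 : q.1 = v := by simpa using this.2
      simpa [← hq1] using this.1
    · intro hp
      apply List.mem_flatMap.2
      refine ⟨p.1, ?_, ?_⟩
      · have hne : d.getD p.1 [] ≠ [] := by
          rw [hgetD]
          intro hnil
          have : p ∈ W.filter (fun q => q.1 == p.1) := List.mem_filter.2 ⟨hp, by simp⟩
          rw [List.map_eq_nil_iff.1 hnil] at this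
          exact absurd this (List.not_mem_nil)
        have hvk : p.1 ∈ d.keys := hkeys_of_getD p.1 hne
        exact (hdskeys p.1).2 (((PySem.List.sorted_perm d.keys (fun x => x) false).mem_iff).2 hvk)
      · apply List.mem_map.2
        refine ⟨p.2, ?_, rfl⟩
        rw [hdsort, hgetD]
        exact List.mem_map.2 ⟨p, List.mem_filter.2 ⟨hp, by simp⟩, rfl⟩
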